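-- pv_equiv track=rewrite | github.com/dmsgk/Prob-Solving | programmers/array/Lv3_숫자게임.py | solution
-- ===== SOURCE A (Python) =====
-- def solution(A, B):
--     answer = 0
--     A.sort()
--     B.sort()
--     for i in range(len(B)):
--         if A[i] < B[i]:
--             answer += 1
--         else:
--             A_maxnum = A.pop()
--             A.insert(i, A_maxnum)
--
--     return answer
-- ===== SOURCE B (Python) =====
-- def solution(A, B):
--     sa = sorted(A)
--     p = 0
--     for b in sorted(B):
--         if p < len(sa) and sa[p] < b:
--             p += 1
--     return p
-- ===== Notes on version B (the rewrite author's own statement) =====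
-- stated objective: alternative
-- what changed: Replaces A's in-place pop()/insert() shuffling of the sorted working list with a single advancing index pointer over sorted copies (no mutation, one clean pass); worst-case cost drops from quadratic inserts to a linear scan after sorting, though on random inputs losses are rare and measured times are comparable.
import Mathlib
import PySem

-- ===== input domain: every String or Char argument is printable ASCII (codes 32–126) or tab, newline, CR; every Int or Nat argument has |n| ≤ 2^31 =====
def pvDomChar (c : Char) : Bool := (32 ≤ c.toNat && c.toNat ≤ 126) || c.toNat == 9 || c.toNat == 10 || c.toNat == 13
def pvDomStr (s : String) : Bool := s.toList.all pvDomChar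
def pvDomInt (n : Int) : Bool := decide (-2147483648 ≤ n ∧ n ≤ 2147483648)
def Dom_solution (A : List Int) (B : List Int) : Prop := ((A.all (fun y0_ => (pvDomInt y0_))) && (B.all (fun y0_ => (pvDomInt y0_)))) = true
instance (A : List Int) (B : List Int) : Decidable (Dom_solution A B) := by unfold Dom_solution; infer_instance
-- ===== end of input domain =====

-- B replaces A's in-place pop()/insert() shuffling of the sorted list with a single
-- advancing index pointer over sorted copies; return values agree — note A sorts/mutates
-- its argument lists in place, which B does not (the claim is about the RETURN value only).

-- ===== PORT A =====
-- literal transliteration of A: sort both, loop i over range(len(B)); on failure pop the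
-- last element of the working list and re-insert it at position i. IndexError branches
-- (pyGet?/pop? = none) keep the state; they are excluded by Pre_solution.
def solution (A : List Int) (B : List Int) : Int :=
  let A1 := PySem.List.sorted A (fun x => x)
  let B1 := PySem.List.sorted B (fun x => x)
  let st := (PySem.List.pyRange 0 (B1.length : Int) 1).foldl
    (fun (st : Int × List Int) i =>
      match PySem.List.pyGet? st.2 i, PySem.List.pyGet? B1 i with
      | some a, some b =>
          if a < b then (st.1 + 1, st.2)
          else
            match PySem.List.pop? st.2 with
            | some (m, L') => (st.1, PySem.List.insert L' i m)
            | none => st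
      | _, _ => st)
    (0, A1)
  st.1

-- ===== PORT B =====
-- literal transliteration of Source B: sorted copies, one pointer p advanced on each win.
def solution_alt (A : List Int) (B : List Int) : Int :=
  let sa := PySem.List.sorted A (fun x => x)
  (PySem.List.sorted B (fun x => x)).foldl
    (fun (p : Int) b =>
      if p < (sa.length : Int) then
        match PySem.List.pyGet? sa p with
        | some a => if a < b then p + 1 else p
        | none => p
      else p)
    0

-- ===== PRECONDITION & SPEC =====
-- Python A raises IndexError whenever len(B) > len(A) (A[i] at i = len(A)); exactly
-- those inputs are excluded.
def Pre_solution (A : List Int) (B : List Int) : Prop := B.length ≤ A.length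
instance (A : List Int) (B : List Int) : Decidable (Pre_solution A B) := by unfold Pre_solution; infer_instance
def pvWitness_solution : List Int × List Int := ([3, 1, 2], [4, 2])

def Spec_solution (A : List Int) (B : List Int) (out : Int) : Prop := out = solution_alt A B
instance (A : List Int) (B : List Int) (out : Int) : Decidable (Spec_solution A B out) := by unfold Spec_solution; infer_instance

-- ===== CLAIM (what is proved, stated in full; the proofs are below) =====
def Claim_equal_solution : Prop := ∀ (A : List Int) (B : List Int), Dom_solution A B → Pre_solution A B → Spec_solution A B (solution A B)

-- ===== LEMMAS AND PROOFS =====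

-- PySem.List.insert at a nonnegative in-range index is take/cons/drop.
theorem pv_insert_natCast (xs : List Int) (i : Nat) (v : Int) (h : i ≤ xs.length) :
    PySem.List.insert xs (i : Int) v = xs.take i ++ v :: xs.drop i := by
  have h1 : min (i : Int) (xs.length : Int) = (i : Int) := by omega
  have h2 : ¬ ((i : Int) < 0) := by omega
  simp [PySem.List.insert, PySem.List.sliceIndices, h1, h2]

-- pop() (default index -1) on a nonempty list returns (last, dropLast).
theorem pv_pop_last (L : List Int) (hne : L ≠ []) :
    PySem.List.pop? L = some (L.getLast hne, L.dropLast) := by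
  conv_lhs => rw [← List.dropLast_concat_getLast hne]
  exact PySem.List.pop?_last _ _

-- The loop invariant: after i steps with p wins, the working list L has the original
-- length and its segment [i, n) is exactly sa[p, p + (n-i)); then the remainder of A's
-- fold returns the same counter as the remainder of B's fold.
theorem pv_loop_eq (sa sb : List Int) (k : Nat) :
    ∀ (i p : Nat) (L : List Int),
    i + k = sb.length → sb.length ≤ sa.length → p ≤ i →
    L.length = sa.length →
    L.drop i = (sa.drop p).take (sa.length - i) →
    ((PySem.List.pyRange (i : Int) (sb.length : Int) 1).foldl
      (fun (st : Int × List Int) j =>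
        match PySem.List.pyGet? st.2 j, PySem.List.pyGet? sb j with
        | some a, some b =>
            if a < b then (st.1 + 1, st.2)
            else
              match PySem.List.pop? st.2 with
              | some (m, L') => (st.1, PySem.List.insert L' j m)
              | none => st
        | _, _ => st)
      ((p : Int), L)).1
    = (sb.drop i).foldl
        (fun (q : Int) b =>
          if q < (sa.length : Int) then
            match PySem.List.pyGet? sa q with
            | some a => if a < b then q + 1 else q
            | none => q
          else q)
        (p : Int) := by
  induction k with
  | zero =>
      intro i p L hk hm hp hL hseg
      have hi : i = sb.length := by omega
      subst hi
      rw [PySem.List.pyRange_one_eq_nil (by omega), List.drop_length]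
      simp [List.foldl]
  | succ k ih =>
      intro i p L hk hm hp hL hseg
      have hilt : i < sb.length := by omega
      have hin : i < sa.length := by omega
      have hiL : i < L.length := by omega
      have hpn : p < sa.length := by omega
      -- head values
      have hLi : L[i] = sa[p] := by
        have h0 : L[i] = (L.drop i)[0]'(by simp; omega) := by
          simp [List.getElem_drop]
        rw [h0]
        simp only [hseg]
        rw [List.getElem_take, List.getElem_drop]
        simp
      -- unfold one step of the range
      rw [PySem.List.pyRange_one_cons (by exact_mod_cast hilt)]
      rw [List.drop_eq_getElem_cons hilt]
      simp only [List.foldl_cons]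
      have hgL : PySem.List.pyGet? L (i : Int) = some L[i] := by
        simp [PySem.List.pyGet?_natCast, List.getElem?_eq_getElem hiL]
      have hgB : PySem.List.pyGet? sb (i : Int) = some sb[i] := by
        simp [PySem.List.pyGet?_natCast, List.getElem?_eq_getElem hilt]
      have hgsa : PySem.List.pyGet? sa (p : Int) = some sa[p] := by
        simp [PySem.List.pyGet?_natCast, List.getElem?_eq_getElem hpn]
      have hq : ((p : Int) < (sa.length : Int)) := by exact_mod_cast hpn
      simp only [hgL, hgB, hgsa, if_pos hq, hLi]
      by_cases hwin : sa[p] < sb[i]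
      · -- win: both counters advance, pointer advances
        rw [if_pos hwin, if_pos hwin]
        have h1 : ((i : Int) + 1) = ((i + 1 : Nat) : Int) := by push_cast; ring
        have h2 : ((p : Int) + 1) = ((p + 1 : Nat) : Int) := by push_cast; ring
        rw [h1, h2]
        apply ih (i + 1) (p + 1) L (by omega) hm (by omega) hL
        -- segment invariant advances
        have hstep : L.drop (i + 1) = (L.drop i).drop 1 := by
          rw [List.drop_drop]
        rw [hstep, hseg, List.drop_take, List.drop_drop]
        have e1 : sa.length - i - 1 = sa.length - (i + 1) := by omega
        rw [e1]
      · -- loss: pop last, insert at i; counter unchanged, pointer p unchanged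
        rw [if_neg hwin, if_neg hwin]
        have hne : L ≠ [] := by
          intro h; rw [h] at hiL; simp at hiL
        simp only [pv_pop_last L hne]
        have hlen' : L.dropLast.length = sa.length - 1 := by
          simp [List.length_dropLast, hL]
        have hile : i ≤ L.dropLast.length := by omega
        simp only [pv_insert_natCast L.dropLast i _ hile]
        have h1 : ((i : Int) + 1) = ((i + 1 : Nat) : Int) := by push_cast; ring
        rw [h1]
        apply ih (i + 1) p _ (by omega) hm (by omega)
        · simp [hlen']
          omega
        · -- drop (i+1) (take i L' ++ x :: drop i L') = take (n-(i+1)) (sa.drop p)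
          have h4 : (L.dropLast.take i).length = i := by simp; omega
          rw [List.drop_append, h4]
          have h5 : (L.dropLast.take i).drop (i + 1) = [] := by
            rw [List.drop_eq_nil_iff]; omega
          have h6 : i + 1 - i = 1 := by omega
          rw [h5, h6]
          simp only [List.nil_append, List.drop_succ_cons, List.drop_zero]
          have hdl : L.dropLast = L.take (sa.length - 1) := by
            rw [List.dropLast_eq_take, hL]
          rw [hdl, List.drop_take, hseg, List.take_take]
          congr 1
          omega

-- ===== VERDICT (by name: the statement is the Claim_ definition above) =====
theorem solution_spec : Claim_equal_solution := by
  intro A B _hdom hpre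
  unfold Spec_solution solution solution_alt
  have hA : (PySem.List.sorted A (fun x => x)).length = A.length := PySem.List.length_sorted A _ _
  have hB : (PySem.List.sorted B (fun x => x)).length = B.length := PySem.List.length_sorted B _ _
  have hm : (PySem.List.sorted B (fun x => x)).length ≤ (PySem.List.sorted A (fun x => x)).length := by
    rw [hA, hB]; exact hpre
  have h0 : ((0 : Nat) : Int) = (0 : Int) := rfl
  have := pv_loop_eq (PySem.List.sorted A (fun x => x)) (PySem.List.sorted B (fun x => x))
    (PySem.List.sorted B (fun x => x)).length 0 0 (PySem.List.sorted A (fun x => x))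
    (by omega) hm (by omega) rfl
    (by simp)
  simpa using this
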